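-- pv_equiv track=rewrite | github.com/glassk/algorithm | Python/Programmars/Level_2/기능개발.py | solution
-- ===== SOURCE A (Python) =====
-- from collections import deque
--
-- def solution(progresses, speeds):
--     answer = []
--     Q = deque()
--     for i in range(len(progresses)):
--         count = 0
--         while progresses[i] < 100:
--             progresses[i] = progresses[i] + speeds[i]
--             count += 1
--         Q.append(count)
--     out = 1
--     limit = 0
--     while Q:
--         temp = Q.popleft()
--         limit = max(limit, temp)
--         if len(Q) and limit >= Q[0]:
--             out += 1
--         else:
--             answer.append(out)
--             out = 1
--     return answer
-- ===== SOURCE B (Python) =====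
-- def solution(progresses, speeds):
--     # days[i] = number of days task i needs (0 if already complete), via ceiling division
--     days = []
--     for i in range(len(progresses)):
--         p = progresses[i]
--         days.append(0 if p >= 100 else -((p - 100) // speeds[i]))
--     # a new release starts exactly where days[i] strictly exceeds the running maximum
--     bounds = []
--     mx = 0
--     for i, d in enumerate(days):
--         if i == 0 or mx < d:
--             bounds.append(i)
--         mx = max(mx, d)
--     bounds.append(len(progresses))
--     return [b2 - b1 for b1, b2 in zip(bounds, bounds[1:])]
-- ===== Notes on version B (the rewrite author's own statement) =====
-- stated objective: alternative
-- what changed: The per-task day count is computed by a ceiling-division closed form instead of A's step-by-step while-loop, and the per-release grouping is computed by collecting boundary indices (strict new prefix-maxima of the days list) and taking consecutive differences, instead of A's deque pop-loop with a running limit and an out-counter.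
import Mathlib
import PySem

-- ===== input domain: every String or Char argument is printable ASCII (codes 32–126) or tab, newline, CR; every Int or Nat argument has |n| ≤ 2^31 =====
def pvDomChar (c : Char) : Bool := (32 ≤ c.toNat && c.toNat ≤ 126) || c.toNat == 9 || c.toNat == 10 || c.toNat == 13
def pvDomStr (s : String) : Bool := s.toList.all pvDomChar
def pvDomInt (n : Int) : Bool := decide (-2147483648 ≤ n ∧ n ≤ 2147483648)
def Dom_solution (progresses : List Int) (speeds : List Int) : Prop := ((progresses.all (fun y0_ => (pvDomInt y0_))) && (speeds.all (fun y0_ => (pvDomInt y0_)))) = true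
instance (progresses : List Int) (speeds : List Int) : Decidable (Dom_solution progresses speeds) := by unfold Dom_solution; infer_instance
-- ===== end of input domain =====

-- B replaces A's day-counting inner while-loop by a ceiling-division closed form and A's deque
-- scan by boundary indices (strict new prefix-maxima) followed by consecutive differencing.
-- A mutates `progresses` in place, B does not; the equivalence proved is about the return value only.

-- ===== PORT A =====
-- inner `while progresses[i] < 100:` loop; the fuel (100 - p).toNat is only a termination
-- guard (enough iterations whenever the speed is ≥ 1, i.e. inside Pre_)
def whileA (fuel : Nat) (p s count : Int) : Int × Int :=
  match fuel with
  | 0 => (p, count)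
  | f + 1 => if p < 100 then whileA f (p + s) s (count + 1) else (p, count)

-- first `for i in range(len(progresses))` loop: state = (progresses list, Q)
def loop1A (progresses : List Int) (speeds : List Int) : List Int × List Int :=
  (PySem.List.pyRange 0 progresses.length 1).foldl
    (fun (st : List Int × List Int) i =>
      let p := PySem.List.pyGetD st.1 i 0
      let r := whileA (100 - p).toNat p (PySem.List.pyGetD speeds i 0) 0
      (PySem.List.pySetD st.1 i r.1, st.2 ++ [r.2]))
    (progresses, [])

-- second `while Q:` loop: drainA Q out limit answer
def drainA : List Int → Int → Int → List Int → List Int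
  | [], _, _, answer => answer
  | temp :: rest, out, limit, answer =>
    let limit' := max limit temp
    match rest with
    | [] => answer ++ [out]
    | q0 :: _ =>
      if limit' ≥ q0 then drainA rest (out + 1) limit' answer
      else drainA rest 1 limit' (answer ++ [out])

def solution (progresses : List Int) (speeds : List Int) : List Int :=
  drainA (loop1A progresses speeds).2 1 0 []

-- ===== PORT B =====
-- `0 if p >= 100 else -((p - 100) // speeds[i])`
def daysForB (p s : Int) : Int :=
  if 100 ≤ p then 0 else -(PySem.Int.floordiv (p - 100) s)

def daysB (progresses : List Int) (speeds : List Int) : List Int :=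
  (PySem.List.pyRange 0 progresses.length 1).map
    (fun i => daysForB (PySem.List.pyGetD progresses i 0) (PySem.List.pyGetD speeds i 0))

-- `for i, d in enumerate(days): if i == 0 or mx < d: bounds.append(i); mx = max(mx, d)`
-- then `bounds.append(len(progresses))`
def boundsB (days : List Int) (n : Int) : List Int :=
  ((PySem.List.enumerate days 0).foldl
    (fun (st : List Int × Int) id =>
      ((if id.1 = 0 ∨ st.2 < id.2 then st.1 ++ [id.1] else st.1), max st.2 id.2))
    ([], 0)).1 ++ [n]

-- `[b2 - b1 for b1, b2 in zip(bounds, bounds[1:])]`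
def diffB (bounds : List Int) : List Int :=
  (bounds.zip (bounds.drop 1)).map (fun b => b.2 - b.1)

def solution_alt (progresses : List Int) (speeds : List Int) : List Int :=
  diffB (boundsB (daysB progresses speeds) progresses.length)

-- ===== PRECONDITION & SPEC =====
-- Pre_ is exactly where Python A returns: a task still in progress needs an existing,
-- strictly positive speed (otherwise A raises IndexError or loops forever).
def Pre_solution (progresses : List Int) (speeds : List Int) : Prop :=
  ∀ i : Nat, i < progresses.length → progresses.getD i 0 < 100 →
    i < speeds.length ∧ 0 < speeds.getD i 0
instance (progresses : List Int) (speeds : List Int) : Decidable (Pre_solution progresses speeds) := by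
  unfold Pre_solution; infer_instance

def pvWitness_solution : List Int × List Int := ([93, 30, 55], [1, 30, 5])

def Spec_solution (progresses : List Int) (speeds : List Int) (out : List Int) : Prop := out = solution_alt progresses speeds
instance (progresses : List Int) (speeds : List Int) (out : List Int) : Decidable (Spec_solution progresses speeds out) := by unfold Spec_solution; infer_instance

-- ===== CLAIM (what is proved, stated in full; the proofs are below) =====
def Claim_equal_solution : Prop := ∀ (progresses : List Int) (speeds : List Int), Dom_solution progresses speeds → Pre_solution progresses speeds → Spec_solution progresses speeds (solution progresses speeds)

-- ===== LEMMAS AND PROOFS =====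

-- A's inner loop counts exactly B's ceiling-division value (when the speed is positive)
lemma whileA_spec (s : Int) (hs : 1 ≤ s) :
    ∀ (fuel : Nat) (p c : Int), (100 - p).toNat ≤ fuel →
      (whileA fuel p s c).2 = c + daysForB p s := by
  intro fuel
  induction fuel with
  | zero =>
    intro p c h
    have hp : (100 : Int) ≤ p := by omega
    simp [whileA, daysForB, hp]
  | succ f ih =>
    intro p c h
    by_cases hp : p < 100
    · have hrec := ih (p + s) (c + 1) (by omega)
      rw [whileA, if_pos hp, hrec]
      have hnp : ¬ (100 : Int) ≤ p := by omega
      by_cases hps : (100 : Int) ≤ p + s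
      · -- one more step finishes: (p-100)//s = -1
        have hfd : PySem.Int.floordiv (p - 100) s = -1 := by
          rw [PySem.Int.floordiv_eq_iff_of_pos (show (0 : Int) < s by omega)]
          constructor <;> nlinarith
        simp only [daysForB, if_neg hnp, if_pos hps, hfd]
        omega
      · -- recurrence: (p-100)//s = ((p+s)-100)//s - 1
        have hfd : PySem.Int.floordiv (p - 100) s = PySem.Int.floordiv (p + s - 100) s - 1 := by
          rw [PySem.Int.floordiv_eq_ediv_of_pos (show (0:Int) < s by omega),
              PySem.Int.floordiv_eq_ediv_of_pos (show (0:Int) < s by omega)]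
          have h1 := Int.add_mul_ediv_right (p - 100) 1 (show s ≠ 0 by omega)
          rw [one_mul, show p - 100 + s = p + s - 100 by ring] at h1
          omega
        simp only [daysForB, if_neg hnp, if_neg hps]
        linarith [hfd]
    · have hp' : (100 : Int) ≤ p := by omega
      simp [whileA, daysForB, hp, hp']

-- A's first loop produces exactly B's `days` list (the in-place writes to `progresses`
-- never touch an index that is still to be read)
lemma foldA_days (progresses speeds : List Int)
    (hpre : Pre_solution progresses speeds) :
    ∀ (m k : Nat) (l : List Int) (acc : List Int),
      progresses.length - k = m →
      l.length = progresses.length →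
      (∀ j : Nat, k ≤ j → j < progresses.length → l.getD j 0 = progresses.getD j 0) →
      ((PySem.List.pyRange (k : Int) (progresses.length : Int) 1).foldl
        (fun (st : List Int × List Int) i =>
          let p := PySem.List.pyGetD st.1 i 0
          let r := whileA (100 - p).toNat p (PySem.List.pyGetD speeds i 0) 0
          (PySem.List.pySetD st.1 i r.1, st.2 ++ [r.2])) (l, acc)).2
      = acc ++ (PySem.List.pyRange (k : Int) (progresses.length : Int) 1).map
          (fun i => daysForB (PySem.List.pyGetD progresses i 0) (PySem.List.pyGetD speeds i 0)) := by
  intro m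
  induction m with
  | zero =>
    intro k l acc hm hlen hagree
    have hk : (progresses.length : Int) ≤ (k : Int) := by exact_mod_cast Int.ofNat_le.mpr (by omega)
    rw [PySem.List.pyRange_one_eq_nil hk]
    simp
  | succ m ih =>
    intro k l acc hm hlen hagree
    have hkn : k < progresses.length := by omega
    have hk : (k : Int) < (progresses.length : Int) := by exact_mod_cast Int.ofNat_lt.mpr hkn
    rw [PySem.List.pyRange_one_cons hk]
    simp only [List.foldl_cons, List.map_cons]
    have hpk : PySem.List.pyGetD l (k : Int) 0 = progresses.getD k 0 := by
      rw [PySem.List.pyGetD_natCast]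
      exact hagree k (le_refl k) hkn
    rw [hpk]
    have hday : (whileA (100 - progresses.getD k 0).toNat
        (progresses.getD k 0) (PySem.List.pyGetD speeds (k : Int) 0) 0).2
        = daysForB (PySem.List.pyGetD progresses (k : Int) 0) (PySem.List.pyGetD speeds (k : Int) 0) := by
      rw [PySem.List.pyGetD_natCast progresses]
      by_cases hplt : progresses.getD k 0 < 100
      · obtain ⟨hins, hsp⟩ := hpre k hkn hplt
        have hws := whileA_spec (PySem.List.pyGetD speeds (k : Int) 0)
          (by rw [PySem.List.pyGetD_natCast]; omega)
          ((100 - progresses.getD k 0).toNat) (progresses.getD k 0) 0 (le_refl _)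
        omega
      · have h100 : (100 : Int) ≤ progresses.getD k 0 := by omega
        have hz : (100 - progresses.getD k 0).toNat = 0 := by omega
        rw [hz]
        simp only [whileA, daysForB, if_pos h100]
    have hcast : (k : Int) + 1 = ((k + 1 : Nat) : Int) := by push_cast; ring
    rw [hcast]
    rw [ih (k + 1) _ _ (by omega)
      (by rw [PySem.List.length_pySetD]; exact hlen)
      (by
        intro j hj hjlt
        have hstep := PySem.List.pyGetD_pySetD_natCast l k j
          ((whileA (100 - progresses.getD k 0).toNat (progresses.getD k 0)
            (PySem.List.pyGetD speeds (k : Int) 0) 0).1) 0 (by omega)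
        simp only [PySem.List.pyGetD_natCast] at hstep ⊢
        rw [hstep, if_neg (by omega : ¬ j = k)]
        exact hagree j (by omega) hjlt)]
    rw [hday]
    simp

-- == proof-only helpers describing the two grouping phases ==

-- drainA as an element-at-a-time group-size stream (limit has already absorbed the popped head)
def sizesTail : List Int → Int → Int → List Int
  | [], _, out => [out]
  | q :: rest, limit, out =>
    if limit ≥ q then sizesTail rest (max limit q) (out + 1)
    else out :: sizesTail rest (max limit q) 1

lemma drainA_eq (rest : List Int) :
    ∀ (t out limit : Int) (answer : List Int),
      drainA (t :: rest) out limit answer = answer ++ sizesTail rest (max limit t) out := by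
  induction rest with
  | nil => intro t out limit answer; simp [drainA, sizesTail]
  | cons q rest' ih =>
    intro t out limit answer
    rw [drainA]
    by_cases hge : max limit t ≥ q
    · rw [if_pos hge, ih, sizesTail, if_pos hge]
    · rw [if_neg hge, ih, sizesTail, if_neg hge]
      simp

-- B's boundary-collecting fold, relative form (indices ≥ 1, so `i == 0` is false)
def goB : List Int → Int → Int → List Int
  | [], _, _ => []
  | d :: rest, i, mx => (if mx < d then [i] else []) ++ goB rest (i + 1) (max mx d)

lemma foldB_go (rest : List Int) :
    ∀ (i mx : Int) (bacc : List Int), 1 ≤ i →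
      ((PySem.List.enumerate rest i).foldl
        (fun (st : List Int × Int) id =>
          ((if id.1 = 0 ∨ st.2 < id.2 then st.1 ++ [id.1] else st.1), max st.2 id.2))
        (bacc, mx)).1
      = bacc ++ goB rest i mx := by
  induction rest with
  | nil => intro i mx bacc _; simp [PySem.List.enumerate_nil, goB]
  | cons d rest' ih =>
    intro i mx bacc hi
    rw [PySem.List.enumerate_cons, List.foldl_cons]
    dsimp only
    have hne : ¬ (i = 0) := by omega
    by_cases hlt : mx < d
    · rw [if_pos (Or.inr hlt), ih (i + 1) (max mx d) (bacc ++ [i]) (by omega)]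
      simp [goB, hlt]
    · rw [if_neg (by simp [hne, hlt]), ih (i + 1) (max mx d) bacc (by omega)]
      simp [goB, hlt]

-- consecutive differences, seeded with the previous boundary
def diffsFrom : Int → List Int → List Int
  | _, [] => []
  | prev, x :: xs => (x - prev) :: diffsFrom x xs

-- the heart: differencing B's boundary indices yields A's group sizes
lemma core (rest : List Int) :
    ∀ (i prev out mx : Int), prev + out = i →
      diffsFrom prev (goB rest i mx ++ [i + (rest.length : Int)]) = sizesTail rest mx out := by
  induction rest with
  | nil =>
    intro i prev out mx h
    simp [goB, diffsFrom, sizesTail]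
    omega
  | cons q rest' ih =>
    intro i prev out mx h
    rw [show i + (((q :: rest').length : Nat) : Int) = (i + 1) + (rest'.length : Int) by
      simp only [List.length_cons]; push_cast; omega]
    rw [goB, sizesTail]
    by_cases hlt : mx < q
    · rw [if_pos hlt, if_neg (by omega)]
      simp only [List.cons_append, List.nil_append, diffsFrom]
      rw [ih (i + 1) i 1 (max mx q) (by ring)]
      congr 1
      omega
    · rw [if_neg hlt, if_pos (by omega)]
      simp only [List.nil_append]
      exact ih (i + 1) prev (out + 1) (max mx q) (by omega)

lemma zip_diff (l : List Int) :
    ∀ (prev : Int), diffB (prev :: l) = diffsFrom prev l := by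
  induction l with
  | nil => intro prev; simp [diffB, diffsFrom]
  | cons x xs ih =>
    intro prev
    have hx := ih x
    simp only [diffB, List.drop_succ_cons, List.drop_zero, List.zip_cons_cons,
      List.map_cons, diffsFrom] at hx ⊢
    rw [hx]

-- the two grouping phases agree on any days list
lemma phase2_eq (D : List Int) (n : Int) (hn : n = (D.length : Int)) :
    drainA D 1 0 [] = diffB (boundsB D n) := by
  cases D with
  | nil =>
    simp [drainA, boundsB, diffB, PySem.List.enumerate_nil]
  | cons d rest =>
    rw [drainA_eq rest d 1 0 []]
    unfold boundsB
    rw [PySem.List.enumerate_cons, List.foldl_cons]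
    dsimp only
    rw [if_pos (Or.inl rfl)]
    simp only [List.nil_append, zero_add]
    rw [foldB_go rest 1 (max 0 d) [(0 : Int)] (le_refl 1)]
    simp only [List.cons_append, List.nil_append]
    rw [zip_diff]
    rw [show n = 1 + (rest.length : Int) by rw [hn]; simp only [List.length_cons]; push_cast; omega]
    rw [core rest 1 0 1 (max 0 d) (by ring)]

lemma loop1A_days (progresses speeds : List Int) (hpre : Pre_solution progresses speeds) :
    (loop1A progresses speeds).2 = daysB progresses speeds := by
  unfold loop1A daysB
  have h := foldA_days progresses speeds hpre progresses.length 0 progresses []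
    (by omega) rfl (fun _ _ _ => rfl)
  simp only [Nat.cast_zero, List.nil_append] at h
  exact h

-- ===== VERDICT (by name: the statement is the Claim_ definition above) =====
theorem solution_spec : Claim_equal_solution := by
  intro progresses speeds _hdom hpre
  unfold Spec_solution solution solution_alt
  rw [loop1A_days progresses speeds hpre]
  exact phase2_eq (daysB progresses speeds) (progresses.length : Int)
    (by unfold daysB; rw [List.length_map, PySem.List.length_pyRange_one]; omega)
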